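-- pv_equiv track=rewrite | github.com/Koziev/chatbot | ruchatbot/preparation/prepare_syntax_validator_dataset.py | remove_terminator
-- ===== SOURCE A (Python) =====
-- def remove_terminator(words):
--     if words[0] == u'-':
--         return remove_terminator(words[1:])
--     else:
--         if words[-1] in (u'.', u'?', u'!'):
--             return words[:-1]
--         else:
--             return words
-- ===== SOURCE B (Python) =====
-- def remove_terminator(words):
--     i = 0
--     while i < len(words) and words[i] == u'-':
--         i += 1
--     tail = words[i:]
--     if tail[-1] in (u'.', u'?', u'!'):
--         return tail[:-1]
--     return tail
-- ===== Notes on version B (the rewrite author's own statement) =====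
-- stated objective: simpler
-- what changed: Replaces the recursion over list slices with a single iterative index scan past the leading dashes followed by one slice and a terminator check.
import Mathlib
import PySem

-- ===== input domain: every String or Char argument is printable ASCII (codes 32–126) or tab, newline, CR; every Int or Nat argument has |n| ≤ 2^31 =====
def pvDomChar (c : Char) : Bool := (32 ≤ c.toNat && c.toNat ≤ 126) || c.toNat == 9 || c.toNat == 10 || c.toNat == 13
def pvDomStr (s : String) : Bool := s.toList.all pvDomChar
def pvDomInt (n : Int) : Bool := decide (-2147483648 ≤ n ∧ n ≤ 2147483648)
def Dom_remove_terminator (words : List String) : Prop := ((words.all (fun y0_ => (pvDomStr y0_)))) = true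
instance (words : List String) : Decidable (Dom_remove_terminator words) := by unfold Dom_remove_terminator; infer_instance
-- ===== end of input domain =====

-- B replaces A's recursion over list slices by one iterative index scan past the
-- leading dashes plus a single slice and terminator check (simpler, one pass).


-- ===== PORT A =====
def remove_terminator : List String → List String
  | [] => []          -- words[0] raises IndexError here (excluded by Pre_)
  | w :: ws =>
    if w = "-" then remove_terminator ws
    else
      if PySem.List.pyGetD (w :: ws) (-1) "" ∈ ["." , "?", "!"] then
        PySem.List.slice (w :: ws) none (some (-1))        -- words[:-1]
      else w :: ws

-- ===== PORT B =====
-- the while loop 'while i < len(words) and words[i] == "-": i += 1'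
def scanDashes (words : List String) (i : Nat) : Nat :=
  if h : i < words.length then
    if words[i] = "-" then scanDashes words (i + 1) else i
  else i
termination_by words.length - i
decreasing_by omega

def remove_terminator_alt (words : List String) : List String :=
  let i := scanDashes words 0
  let tail := PySem.List.slice words (some (i : Int)) none   -- words[i:]
  if PySem.List.pyGetD tail (-1) "" ∈ ["." , "?", "!"] then  -- tail[-1] raises on empty tail (excluded by Pre_)
    PySem.List.slice tail none (some (-1))                   -- tail[:-1]
  else tail

-- ===== PRECONDITION & SPEC =====
-- A (and B) raise IndexError when words is empty or consists only of '-' tokens.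
def Pre_remove_terminator (words : List String) : Prop := ∃ w ∈ words, w ≠ "-"
instance (words : List String) : Decidable (Pre_remove_terminator words) := by
  unfold Pre_remove_terminator; infer_instance

def pvWitness_remove_terminator : List String := ["-", "hello", "world", "."]

def Spec_remove_terminator (words : List String) (out : List String) : Prop := out = remove_terminator_alt words
instance (words : List String) (out : List String) : Decidable (Spec_remove_terminator words out) := by unfold Spec_remove_terminator; infer_instance

-- ===== CLAIM (what is proved, stated in full; the proofs are below) =====
def Claim_equal_remove_terminator : Prop := ∀ (words : List String), Dom_remove_terminator words → Pre_remove_terminator words → Spec_remove_terminator words (remove_terminator words)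

-- ===== LEMMAS AND PROOFS =====

-- the common normal form both ports reach on Pre_: strip leading dashes, then drop a terminator
def pvFinish (tail : List String) : List String :=
  if PySem.List.pyGetD tail (-1) "" ∈ ["." , "?", "!"] then tail.dropLast else tail

lemma scanDashes_drop (words : List String) (i : Nat) :
    words.drop (scanDashes words i) = (words.drop i).dropWhile (fun w => w == "-") := by
  induction i using scanDashes.induct words with
  | case1 i h hdash ih =>
    rw [scanDashes, dif_pos h, if_pos hdash, ih,
      List.drop_eq_getElem_cons h, List.dropWhile_cons_of_pos (by simp [hdash])]
  | case2 i h hdash =>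
    rw [scanDashes, dif_pos h, if_neg hdash,
      List.drop_eq_getElem_cons h, List.dropWhile_cons_of_neg (by simp [hdash]),
      ← List.drop_eq_getElem_cons h]
  | case3 i h =>
    rw [scanDashes, dif_neg h, List.drop_eq_nil_of_le (by omega)]
    rfl

lemma portA_eq_finish (words : List String) (h : Pre_remove_terminator words) :
    remove_terminator words = pvFinish (words.dropWhile (fun w => w == "-")) := by
  induction words with
  | nil => simp [Pre_remove_terminator] at h
  | cons w ws ih =>
    by_cases hw : w = "-"
    · subst hw
      have h' : Pre_remove_terminator ws := by
        obtain ⟨x, hx, hne⟩ := h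
        rcases hx with _ | hx
        · exact absurd rfl hne
        · exact ⟨x, ‹_›, hne⟩
      rw [remove_terminator, if_pos rfl, ih h',
        List.dropWhile_cons_of_pos (by simp)]
    · rw [remove_terminator, if_neg hw, List.dropWhile_cons_of_neg (by simp [hw])]
      unfold pvFinish
      split
      · exact PySem.List.slice_to_neg_one _
      · rfl

lemma portB_eq_finish (words : List String) :
    remove_terminator_alt words = pvFinish (words.dropWhile (fun w => w == "-")) := by
  unfold remove_terminator_alt pvFinish
  have hdrop : PySem.List.slice words (some ((scanDashes words 0 : Nat) : Int)) none
      = words.dropWhile (fun w => w == "-") := by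
    rw [PySem.List.slice_from_natCast]
    simpa using scanDashes_drop words 0
  simp only [hdrop]
  split
  · exact PySem.List.slice_to_neg_one _
  · rfl

-- ===== VERDICT (by name: the statement is the Claim_ definition above) =====
theorem remove_terminator_spec : Claim_equal_remove_terminator := by
  intro words _ hpre
  unfold Spec_remove_terminator
  rw [portA_eq_finish words hpre, portB_eq_finish words]
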